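-- pv_equiv track=rewrite | github.com/the-omega-institute/automath | theory/2026_golden_ratio_driven_scan_projection_generation_recursive_emergence/scripts/exp_spg_dyadic_boundary_holography_audit.py | _oriented_faces
-- ===== SOURCE A (Python) =====
-- from typing import Dict, List, Tuple
--
-- def _oriented_faces(n: int, m: int) -> List[Tuple[int, Tuple[int, ...]]]:
--     """
--     Oriented (n-1)-faces are represented as (axis, anchor),
--     where axis in {0,...,n-1} is the normal direction, and anchor is an n-tuple
--     with anchor[axis] in {0,...,2^m} (face hyperplane position) and others in {0,...,2^m-1}.
--
--     Orientation convention: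
--       axis = i means face is orthogonal to e_i, oriented by increasing x_i.
--       A cube at lower corner c contributes:
--         + to face at anchor with anchor[i]=c[i]+1 (positive side),
--         - to face at anchor with anchor[i]=c[i]   (negative side).
--     """
--     L = 1 << m
--     faces: List[Tuple[int, Tuple[int, ...]]] = []
--     for axis in range(n):
--         # other coordinates in 0..L-1, axis coordinate in 0..L
--         for idx in range((L + 1) * (L ** (n - 1))):
--             anchor: List[int] = [0] * n
--             x = idx
--             for j in range(n):
--                 if j == axis:
--                     anchor[j] = x % (L + 1)
--                     x //= (L + 1)
--                 else:
--                     anchor[j] = x % L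
--                     x //= L
--             faces.append((axis, tuple(anchor)))
--     return faces
-- ===== SOURCE B (Python) =====
-- from typing import Dict, List, Tuple
--
-- def _oriented_faces(n: int, m: int) -> List[Tuple[int, Tuple[int, ...]]]:
--     """Enumerate oriented (n-1)-faces by direct Cartesian-product construction:
--     for each axis, build the anchors by prepending coordinate ranges from the
--     last coordinate down to the first, so anchor[0] varies fastest."""
--     L = 1 << m
--     faces: List[Tuple[int, Tuple[int, ...]]] = []
--     for axis in range(n):
--         anchors: List[List[int]] = [[]]
--         for j in range(n - 1, -1, -1):
--             base = L + 1 if j == axis else L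
--             anchors = [[v] + a for a in anchors for v in range(base)]
--         for a in anchors:
--             faces.append((axis, tuple(a)))
--     return faces
-- ===== Notes on version B (the rewrite author's own statement) =====
-- stated objective: simpler
-- what changed: Replaces the flat-index mixed-radix decode (an index loop with % and // per coordinate) by a direct Cartesian-product construction that builds the anchor lists by prepending each coordinate's range from the last coordinate down to the first.
import Mathlib
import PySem

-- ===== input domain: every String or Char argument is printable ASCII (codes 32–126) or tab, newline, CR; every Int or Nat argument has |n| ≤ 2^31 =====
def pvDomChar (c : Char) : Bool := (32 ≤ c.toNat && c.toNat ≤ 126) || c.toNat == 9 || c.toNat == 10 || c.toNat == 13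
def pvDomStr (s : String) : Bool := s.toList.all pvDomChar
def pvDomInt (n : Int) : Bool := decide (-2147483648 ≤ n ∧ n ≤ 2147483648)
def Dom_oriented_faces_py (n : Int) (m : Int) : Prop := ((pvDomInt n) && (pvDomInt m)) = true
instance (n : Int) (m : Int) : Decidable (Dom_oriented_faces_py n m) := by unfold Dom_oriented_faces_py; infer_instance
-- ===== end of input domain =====

-- B replaces A's flat-index mixed-radix decode by a direct Cartesian-product construction (simpler).

-- ===== PORT A =====
-- literal port of A: for each axis, decode every flat index into an anchor by % and //
def oriented_faces_py (n : Int) (m : Int) : List (Int × List Int) :=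
  let L : Int := 1 <<< m.toNat   -- Python '1 << m'; Pre_ requires 0 ≤ m (negative shift raises)
  (PySem.List.pyRange 0 n 1).foldl (fun faces axis =>
    (PySem.List.pyRange 0 ((L + 1) * L ^ (n - 1).toNat) 1).foldl (fun faces idx =>
      let anchor : List Int := List.replicate n.toNat 0
      let st := (PySem.List.pyRange 0 n 1).foldl (fun (st : List Int × Int) j =>
        if j == axis then
          (st.1.set j.toNat (PySem.Int.mod st.2 (L + 1)), PySem.Int.floordiv st.2 (L + 1))
        else
          (st.1.set j.toNat (PySem.Int.mod st.2 L), PySem.Int.floordiv st.2 L))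
        (anchor, idx)
      faces ++ [(axis, st.1)]) faces) []

-- ===== PORT B =====
-- literal port of B: for each axis, build the anchors by prepending coordinate ranges
def oriented_faces_py_alt (n : Int) (m : Int) : List (Int × List Int) :=
  let L : Int := 1 <<< m.toNat
  (PySem.List.pyRange 0 n 1).foldl (fun faces axis =>
    let anchors : List (List Int) :=
      (PySem.List.pyRange (n - 1) (-1) (-1)).foldl (fun anchors j =>
        let base : Int := if j == axis then L + 1 else L
        anchors.flatMap (fun a => (PySem.List.pyRange 0 base 1).map (fun v => v :: a)))
        [[]]
    faces ++ anchors.map (fun a => (axis, a))) []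

-- ===== PRECONDITION & SPEC =====
-- Pre_ excludes m < 0, where Python's '1 << m' raises ValueError in both A and B.
def Pre_oriented_faces_py (n : Int) (m : Int) : Prop := 0 ≤ m
instance (n : Int) (m : Int) : Decidable (Pre_oriented_faces_py n m) := by unfold Pre_oriented_faces_py; infer_instance
def pvWitness_oriented_faces_py : Int × Int := (2, 1)
def Spec_oriented_faces_py (n : Int) (m : Int) (out : List (Int × List Int)) : Prop := out = oriented_faces_py_alt n m
instance (n : Int) (m : Int) (out : List (Int × List Int)) : Decidable (Spec_oriented_faces_py n m out) := by unfold Spec_oriented_faces_py; infer_instance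

-- ===== CLAIM (what is proved, stated in full; the proofs are below) =====
def Claim_equal_oriented_faces_py : Prop := ∀ (n : Int) (m : Int), Dom_oriented_faces_py n m → Pre_oriented_faces_py n m → Spec_oriented_faces_py n m (oriented_faces_py n m)

-- ===== LEMMAS AND PROOFS =====

-- mixed-radix digits of x with base list bs (least significant first)
def pvDigits : List Int → Int → List Int
  | [], _ => []
  | b :: bs, x => PySem.Int.mod x b :: pvDigits bs (PySem.Int.floordiv x b)

-- Cartesian product of the base ranges, first coordinate fastest
def pvProdL : List Int → List (List Int)
  | [] => [[]]
  | b :: bs => (pvProdL bs).flatMap (fun a => (PySem.List.pyRange 0 b 1).map (fun v => v :: a))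

lemma pv_flatMap_congr {α β : Type} {f g : α → List β} :
    ∀ (l : List α), (∀ a ∈ l, f a = g a) → l.flatMap f = l.flatMap g := by
  intro l
  induction l with
  | nil => intro _; rfl
  | cons a l ih =>
    intro h
    simp only [List.flatMap_cons, h a (by simp), ih (fun x hx => h x (by simp [hx]))]

-- fold that appends one element per item = append of a map
lemma pv_foldl_append {α β : Type} (g : α → β) :
    ∀ (l : List α) (init : List β),
      l.foldl (fun fs x => fs ++ [g x]) init = init ++ l.map g := by
  intro l
  induction l with
  | nil => simp
  | cons a l ih => intro init; simp [List.foldl_cons, ih]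

-- A's per-index coordinate loop computes the mixed-radix digits
lemma pv_afold (L axis : Int) (n : Int) :
    ∀ (k : Nat) (s : Int) (anchor : List Int) (x : Int), 0 ≤ s → (n - s).toNat = k →
      anchor.length = n.toNat →
      ((PySem.List.pyRange s n 1).foldl (fun (st : List Int × Int) j =>
          if j == axis then
            (st.1.set j.toNat (PySem.Int.mod st.2 (L + 1)), PySem.Int.floordiv st.2 (L + 1))
          else
            (st.1.set j.toNat (PySem.Int.mod st.2 L), PySem.Int.floordiv st.2 L)) (anchor, x)).1
        = anchor.take s.toNat ++
            pvDigits ((PySem.List.pyRange s n 1).map (fun j => if j == axis then L + 1 else L)) x := by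
  intro k
  induction k with
  | zero =>
    intro s anchor x hs hk hlen
    have hns : n ≤ s := by omega
    rw [PySem.List.pyRange_one_eq_nil hns]
    simp [pvDigits, List.take_of_length_le (by omega : anchor.length ≤ s.toNat)]
  | succ k ih =>
    intro s anchor x hs hk hlen
    have hsn : s < n := by omega
    rw [PySem.List.pyRange_one_cons hsn]
    have hslt : s.toNat < anchor.length := by omega
    have hset : ∀ (v : Int), (anchor.set s.toNat v).take (s.toNat + 1) = anchor.take s.toNat ++ [v] := by
      intro v
      rw [List.set_eq_take_append_cons_drop, if_pos hslt]
      rw [List.take_append]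
      have h1 : (anchor.take s.toNat).length = s.toNat := by simp; omega
      rw [List.take_of_length_le (by omega), h1]
      have h2 : s.toNat + 1 - s.toNat = 1 := by omega
      rw [h2]
      simp
    have hnext : ((s : Int) + 1).toNat = s.toNat + 1 := by omega
    by_cases h : (s == axis) = true
    · simp only [List.foldl_cons, List.map_cons, h, if_pos, pvDigits]
      rw [ih (s + 1) _ _ (by omega) (by omega) (by simpa using hlen)]
      rw [hnext, hset]
      simp
    · simp only [List.foldl_cons, List.map_cons, h, pvDigits, Bool.false_eq_true, if_false]
      rw [ih (s + 1) _ _ (by omega) (by omega) (by simpa using hlen)]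
      rw [hnext, hset]
      simp

-- range over a product of two sizes splits into a nested enumeration
lemma pv_range_mul (b : Int) (hb : 0 < b) :
    ∀ (k : Nat) (P : Int), P.toNat = k → 0 ≤ P →
      PySem.List.pyRange 0 (b * P) 1
        = (PySem.List.pyRange 0 P 1).flatMap
            (fun q => (PySem.List.pyRange 0 b 1).map (fun v => q * b + v)) := by
  intro k
  induction k with
  | zero =>
    intro P hk hP
    have : P = 0 := by omega
    subst this
    simp [PySem.List.pyRange_one_eq_nil]
  | succ k ih =>
    intro P hk hP
    have hP1 : (1:Int) ≤ P := by omega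
    have e1 : PySem.List.pyRange 0 P 1 = PySem.List.pyRange 0 (P - 1) 1 ++ [P - 1] := by
      rw [PySem.List.pyRange_one_append 0 (P - 1) P (by omega) (by omega)]
      congr 1
      have h2 := PySem.List.pyRange_one_singleton (P - 1)
      rw [show P - 1 + 1 = P by ring] at h2
      exact h2
    rw [e1, List.flatMap_append, ← ih (P - 1) (by omega) (by omega)]
    rw [PySem.List.pyRange_one_append 0 (b * (P - 1)) (b * P) (by nlinarith) (by nlinarith)]
    congr 1
    simp only [List.flatMap_cons, List.flatMap_nil, List.append_nil]
    rw [PySem.List.pyRange_one, PySem.List.pyRange_one]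
    have hlen : (b * P - b * (P - 1)).toNat = (b - 0).toNat := by
      congr 1
      ring_nf
    rw [hlen, List.map_map]
    apply List.map_congr_left
    intro a _
    simp [Function.comp]
    ring

-- decoding a combined index q*b+v with 0 ≤ v < b
lemma pv_digits_cons (b : Int) (bs : List Int) (q v : Int) (hb : 0 < b) (hv0 : 0 ≤ v) (hvb : v < b) :
    pvDigits (b :: bs) (q * b + v) = v :: pvDigits bs q := by
  simp only [pvDigits]
  rw [PySem.Int.mod_eq_emod_of_pos hb, PySem.Int.floordiv_eq_ediv_of_pos hb]
  have hm : (v + b * q) % b = v := by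
    rw [Int.add_mul_emod_self_left]
    exact Int.emod_eq_of_lt hv0 hvb
  have hd : (v + b * q) / b = q := by
    rw [Int.add_mul_ediv_left _ _ (by omega : b ≠ 0), Int.ediv_eq_zero_of_lt hv0 hvb]
    ring
  rw [show q * b + v = v + b * q by ring, hm, hd]

-- the decode of every flat index, in order, is exactly the Cartesian product
lemma pv_prod_digits :
    ∀ (bs : List Int), (∀ b ∈ bs, 0 < b) →
      (PySem.List.pyRange 0 bs.prod 1).map (pvDigits bs) = pvProdL bs := by
  intro bs
  induction bs with
  | nil =>
    intro _
    decide
  | cons b bs ih =>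
    intro hpos
    have hb : 0 < b := hpos b (by simp)
    have hbs : ∀ x ∈ bs, 0 < x := fun x hx => hpos x (by simp [hx])
    have hP : 0 ≤ bs.prod := le_of_lt (List.prod_pos hbs)
    rw [List.prod_cons, pv_range_mul b hb bs.prod.toNat bs.prod rfl hP]
    rw [List.map_flatMap]
    show _ = pvProdL (b :: bs)
    rw [pvProdL, ← ih hbs, List.flatMap_map]
    apply pv_flatMap_congr
    intro q _
    rw [List.map_map]
    apply List.map_congr_left
    intro v hv
    have hv' : 0 ≤ v ∧ v < b := (PySem.List.mem_pyRange_one.mp hv).imp id id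
    exact pv_digits_cons b bs q v hb hv'.1 hv'.2

-- away from the axis, the base list is constant L
lemma pv_map_const (L axis a b : Int) (h : b ≤ axis ∨ axis < a) (ha : 0 ≤ a) :
    (PySem.List.pyRange a b 1).map (fun j => if j == axis then L + 1 else L)
      = List.replicate (b - a).toNat L := by
  rw [PySem.List.pyRange_one, List.map_map]
  rw [List.eq_replicate_iff]
  constructor
  · simp
  · intro x hx
    simp only [List.mem_map, List.mem_range, Function.comp] at hx
    obtain ⟨k, hk, hkx⟩ := hx
    have : ((a + (k : Int)) == axis) = false := by
      simp only [beq_eq_false_iff_ne, ne_eq]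
      omega
    rw [this] at hkx
    simp at hkx
    exact hkx.symm

-- product of the base list
lemma pv_bases_prod (L n axis : Int) (h0 : 0 ≤ axis) (h1 : axis < n) :
    ((PySem.List.pyRange 0 n 1).map (fun j => if j == axis then L + 1 else L)).prod
      = (L + 1) * L ^ (n - 1).toNat := by
  rw [PySem.List.pyRange_one_append 0 axis n h0 (by omega), List.map_append, List.prod_append]
  rw [PySem.List.pyRange_one_cons h1, List.map_cons, List.prod_cons]
  rw [pv_map_const L axis 0 axis (by omega) (by omega)]
  rw [pv_map_const L axis (axis + 1) n (by omega) (by omega)]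
  simp only [beq_self_eq_true, if_true, List.prod_replicate]
  rw [show (n - 1).toNat = (axis - 0).toNat + (n - (axis + 1)).toNat by omega, pow_add]
  ring

-- B's countdown fold builds the Cartesian product of the base list
lemma pv_bfold (L axis n : Int) :
    ∀ (k : Nat) (t : Int), 0 ≤ t → t ≤ n → t.toNat = k →
      (PySem.List.pyRange (t - 1) (-1) (-1)).foldl
          (fun anchors j =>
            anchors.flatMap (fun a =>
              (PySem.List.pyRange 0 (if j == axis then L + 1 else L) 1).map (fun v => v :: a)))
          (pvProdL ((PySem.List.pyRange t n 1).map (fun j => if j == axis then L + 1 else L)))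
        = pvProdL ((PySem.List.pyRange 0 n 1).map (fun j => if j == axis then L + 1 else L)) := by
  intro k
  induction k with
  | zero =>
    intro t h0 h1 hk
    have : t = 0 := by omega
    subst this
    rw [PySem.List.pyRange_neg_one_eq_nil (by omega)]
    rfl
  | succ k ih =>
    intro t h0 h1 hk
    rw [PySem.List.pyRange_neg_one_cons (by omega : (-1:Int) < t - 1), List.foldl_cons]
    have hstep :
        (pvProdL ((PySem.List.pyRange t n 1).map (fun j => if j == axis then L + 1 else L))).flatMap
            (fun a => (PySem.List.pyRange 0 (if (t - 1) == axis then L + 1 else L) 1).map (fun v => v :: a))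
          = pvProdL ((PySem.List.pyRange (t - 1) n 1).map (fun j => if j == axis then L + 1 else L)) := by
      rw [PySem.List.pyRange_one_cons (by omega : t - 1 < n), List.map_cons, pvProdL]
      rw [show t - 1 + 1 = t by ring]
    rw [hstep, show t - 1 - 1 = (t - 1) - 1 by ring]
    exact ih (t - 1) (by omega) (by omega) (by omega)

-- per-axis: A's decode enumeration equals B's product construction
lemma pv_axis_eq (L n axis : Int) (hL : 0 < L) (h0 : 0 ≤ axis) (h1 : axis < n) :
    (PySem.List.pyRange 0 ((L + 1) * L ^ (n - 1).toNat) 1).map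
        (fun idx => ((PySem.List.pyRange 0 n 1).foldl (fun (st : List Int × Int) j =>
            if j == axis then
              (st.1.set j.toNat (PySem.Int.mod st.2 (L + 1)), PySem.Int.floordiv st.2 (L + 1))
            else
              (st.1.set j.toNat (PySem.Int.mod st.2 L), PySem.Int.floordiv st.2 L))
          (List.replicate n.toNat 0, idx)).1)
      = (PySem.List.pyRange (n - 1) (-1) (-1)).foldl
          (fun anchors j =>
            anchors.flatMap (fun a =>
              (PySem.List.pyRange 0 (if j == axis then L + 1 else L) 1).map (fun v => v :: a)))
          [[]] := by
  have hbases : ∀ b ∈ (PySem.List.pyRange 0 n 1).map (fun j => if j == axis then L + 1 else L), 0 < b := by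
    intro b hb
    simp only [List.mem_map] at hb
    obtain ⟨j, _, hj⟩ := hb
    by_cases h : (j == axis) = true <;> simp [h] at hj <;> omega
  have hinit : ([[]] : List (List Int))
      = pvProdL ((PySem.List.pyRange n n 1).map (fun j => if j == axis then L + 1 else L)) := by
    rw [PySem.List.pyRange_one_eq_nil (le_refl n)]
    rfl
  rw [hinit, pv_bfold L axis n n.toNat n (by omega) (le_refl n) rfl]
  rw [← pv_bases_prod L n axis h0 h1]
  rw [← pv_prod_digits _ hbases]
  apply List.map_congr_left
  intro idx _
  have := pv_afold L axis n n.toNat 0 (List.replicate n.toNat 0) idx (by omega) (by omega) (by simp)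
  simpa using this

-- ===== VERDICT (by name: the statement is the Claim_ definition above) =====
theorem oriented_faces_py_spec : Claim_equal_oriented_faces_py := by
  intro n m _ hm
  unfold Spec_oriented_faces_py
  simp only [oriented_faces_py, oriented_faces_py_alt]
  apply PySem.List.foldl_congr_mem
  intro faces axis hax
  have hax' : 0 ≤ axis ∧ axis < n := PySem.List.mem_pyRange_one.mp hax
  have hL : (0:Int) < ((1 <<< m.toNat : Nat) : Int) := by
    have h : 0 < (1 <<< m.toNat : Nat) := by rw [Nat.shiftLeft_eq]; positivity
    exact_mod_cast h
  rw [pv_foldl_append,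
    ← pv_axis_eq ((1 <<< m.toNat : Nat) : Int) n axis hL hax'.1 hax'.2, List.map_map]
  simp only [Function.comp_def]
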